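-- pv_equiv track=rewrite | github.com/patrickfrey/strusWikipediaSearch | scripts/strusnlp_spacy.py | getMostUsedMultipartList
-- ===== SOURCE A (Python) =====
-- def getMostUsedMultipartList( usageMap):
--     selMap = {}
--     usageCntMap = {}
--     for key,usage in usageMap.items():
--         if usage >= 3 and key.find(' ') >= 0:
--              selMap[ key] = usage
--              if usage in usageCntMap:
--                  usageCntMap[ usage] += 1
--              else:
--                  usageCntMap[ usage] = 1
--     minusage = 3
--     maxlen = len(usageMap) / 5
--     pp = 0
--     for usage in sorted( usageCntMap.keys(), reverse=True):
--         pp += usageCntMap[ usage]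
--         if pp > maxlen:
--             minusage = usage
--             break
--     if minusage > 3:
--         reduMap = {}
--         for key,usage in selMap.items():
--             if usage >= minusage:
--                 reduMap[ key] = usage
--         return [elem.split(' ') for elem in reduMap.keys()]
--     else:
--         return [elem.split(' ') for elem in selMap.keys()]
-- ===== SOURCE B (Python) =====
-- def getMostUsedMultipartList(usageMap):
--     sel = [(key, usage) for key, usage in usageMap.items()
--            if usage >= 3 and ' ' in key]
--     vals = sorted((usage for _, usage in sel), reverse=True)
--     idx = len(usageMap) // 5
--     minusage = vals[idx] if idx < len(vals) else 3
--     if minusage > 3: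
--         return [key.split(' ') for key, usage in sel if usage >= minusage]
--     return [key.split(' ') for key, _ in sel]
-- ===== Notes on version B (the rewrite author's own statement) =====
-- stated objective: simpler
-- what changed: B builds no dictionaries at all: selection is a plain filtered list, and instead of A's usageCntMap counter plus a group-wise break loop the threshold is read off in closed form as vals[len(usageMap)//5] from the descending-sorted list of selected usages (defaulting to 3 past the end); the reduced output is a filtered comprehension instead of A's reduMap dict.
import Mathlib
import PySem

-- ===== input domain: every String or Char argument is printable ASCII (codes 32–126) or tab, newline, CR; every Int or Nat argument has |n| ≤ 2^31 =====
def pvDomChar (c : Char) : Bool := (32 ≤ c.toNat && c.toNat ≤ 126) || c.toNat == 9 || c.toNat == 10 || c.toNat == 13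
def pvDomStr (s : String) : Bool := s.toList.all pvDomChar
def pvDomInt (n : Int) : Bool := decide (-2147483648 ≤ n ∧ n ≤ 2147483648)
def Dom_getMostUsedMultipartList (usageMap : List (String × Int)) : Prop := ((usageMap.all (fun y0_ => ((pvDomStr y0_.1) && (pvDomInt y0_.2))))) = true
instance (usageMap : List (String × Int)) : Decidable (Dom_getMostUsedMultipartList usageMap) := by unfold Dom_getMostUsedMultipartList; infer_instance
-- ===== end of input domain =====

-- B builds no dictionaries: selection is a plain filtered list and the usage threshold is the
-- closed-form vals[len(usageMap)//5] read from the descending-sorted selected usages (objective: simpler).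

-- elem.split(' '): PySem.Str.split? is none only for an empty separator, so with " " it is total
def pvSplit (s : String) : List String := (PySem.Str.split? s " ").getD []

-- ===== PORT A =====
-- 'for usage in sorted(usageCntMap.keys(), reverse=True): pp += usageCntMap[usage]; if pp > maxlen: minusage = usage; break'
-- maxlen = len(usageMap)/5 is Python FLOAT division; for integer pp and |len| ≤ 2^31 the test
-- 'pp > len/5' is exactly '5*pp > len' (len/5 is either exact or ≥ 1/5 away from any integer, far
-- above double rounding error), so the port carries L = len and compares 5*pp with L.
def pvGoA (L : Int) (cnt : PySem.Dict Int Int) : Int → List Int → Int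
  | _, [] => 3
  | pp, u :: rest =>
    let pp' := pp + cnt.getD u 0      -- usageCntMap[usage]: the key is always present here
    if 5 * pp' > L then u else pvGoA L cnt pp' rest

def getMostUsedMultipartList (usageMap : List (String × Int)) : List (List String) :=
  -- one loop builds selMap and usageCntMap together (pair accumulator)
  let st := usageMap.foldl
    (fun (st : PySem.Dict String Int × PySem.Dict Int Int) kv =>
      if 3 ≤ kv.2 ∧ 0 ≤ PySem.Str.find kv.1 " " then
        (st.1.insert kv.1 kv.2,
         if st.2.contains kv.2 then st.2.modify kv.2 0 (· + 1) else st.2.insert kv.2 1)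
      else st)
    (PySem.Dict.empty, PySem.Dict.empty)
  let selMap := st.1
  let cntMap := st.2
  let minusage := pvGoA (usageMap.length : Int) cntMap 0 (PySem.List.sorted cntMap.keys (fun u => u) true)
  if 3 < minusage then
    let reduMap := selMap.items.foldl
      (fun (d : PySem.Dict String Int) kv => if minusage ≤ kv.2 then d.insert kv.1 kv.2 else d)
      PySem.Dict.empty
    reduMap.keys.map (fun e => pvSplit e)
  else
    selMap.keys.map (fun e => pvSplit e)

-- ===== PORT B =====
-- 'vals[idx] if idx < len(vals) else 3' is List.getD; 'minusage > maxlen'-free: the break index of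
-- a per-item walk over a descending list with float maxlen = len/5 is exactly len // 5 (Nat division).
def getMostUsedMultipartList_alt (usageMap : List (String × Int)) : List (List String) :=
  let sel := usageMap.filter (fun kv => decide (3 ≤ kv.2) && PySem.Str.isIn " " kv.1)
  let vals := PySem.List.sorted (sel.map (·.2)) (fun u => u) true
  let idx := usageMap.length / 5
  let minusage := vals.getD idx 3
  if 3 < minusage then
    (sel.filter (fun kv => decide (minusage ≤ kv.2))).map (fun kv => pvSplit kv.1)
  else
    sel.map (fun kv => pvSplit kv.1)

-- ===== PRECONDITION & SPEC =====
-- usageMap models a Python dict, whose keys are unique by construction; Pre_ excludes association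
-- lists with duplicate keys, which correspond to no dict input (A's dicts would overwrite while
-- B's lists keep every occurrence).
def Pre_getMostUsedMultipartList (usageMap : List (String × Int)) : Prop :=
  (usageMap.map (·.1)).Nodup
instance (usageMap : List (String × Int)) : Decidable (Pre_getMostUsedMultipartList usageMap) := by
  unfold Pre_getMostUsedMultipartList; infer_instance
def pvWitness_getMostUsedMultipartList : (List (String × Int)) :=
  [("a b", 5), ("c", 4), ("d e", 3), ("f g", 2)]
def Spec_getMostUsedMultipartList (usageMap : List (String × Int)) (out : List (List String)) : Prop := out = getMostUsedMultipartList_alt usageMap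
instance (usageMap : List (String × Int)) (out : List (List String)) : Decidable (Spec_getMostUsedMultipartList usageMap out) := by unfold Spec_getMostUsedMultipartList; infer_instance

-- ===== CLAIM (what is proved, stated in full; the proofs are below) =====
def Claim_equal_getMostUsedMultipartList : Prop := ∀ (usageMap : List (String × Int)), Dom_getMostUsedMultipartList usageMap → Pre_getMostUsedMultipartList usageMap → Spec_getMostUsedMultipartList usageMap (getMostUsedMultipartList usageMap)

-- ===== LEMMAS AND PROOFS =====

-- the shared selection predicate
def pvSel (kv : String × Int) : Bool := decide (3 ≤ kv.2 ∧ 0 ≤ PySem.Str.find kv.1 " ")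

-- A's 'key.find(' ') >= 0' and B's '' ' in key' select the same pairs
theorem pv_sel_eq :
    (fun kv : String × Int => decide (3 ≤ kv.2) && PySem.Str.isIn " " kv.1) = pvSel := by
  funext kv
  simp only [pvSel, Bool.decide_and]
  congr 1
  rw [Bool.eq_iff_iff, decide_eq_true_eq, PySem.Str.isIn_iff_infix, ← PySem.Str.find_nonneg_iff]

-- an insert loop over fresh distinct keys is filter (selMap of A, reduMap of A)
theorem pv_insert_fold_items (l : List (String × Int)) (p : String × Int → Bool)
    (h : (l.map (·.1)).Nodup) :
    (l.foldl (fun (d : PySem.Dict String Int) kv =>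
        if p kv then d.insert kv.1 kv.2 else d) PySem.Dict.empty).items
      = l.filter p := by
  rw [← List.foldl_filter]
  have hnd : ((l.filter p).map (·.1)).Nodup :=
    ((List.filter_sublist (l := l) (p := p)).map (·.1)).nodup h
  have := PySem.Dict.items_foldl_insert_fresh (l.filter p) (·.1) (·.2) PySem.Dict.empty
      (fun a _ => by simp) hnd
  simpa using this

-- A's branchy counter update is exactly the counter fold step
theorem pv_cnt_step (d : PySem.Dict Int Int) (u : Int) :
    (if d.contains u then d.modify u 0 (· + 1) else d.insert u 1)
      = d.insert u (d.getD u 0 + 1) := by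
  by_cases hc : d.contains u
  · simp [hc]; rfl
  · rw [if_neg (by simp [hc]), PySem.Dict.getD_of_not_contains d 0 (by simpa using hc)]
    norm_num

-- A's pair fold splits into a selMap fold and the counter of the selected usages
theorem pv_pair_fold (um : List (String × Int)) :
    um.foldl (fun (st : PySem.Dict String Int × PySem.Dict Int Int) kv =>
        if 3 ≤ kv.2 ∧ 0 ≤ PySem.Str.find kv.1 " " then
          (st.1.insert kv.1 kv.2,
           if st.2.contains kv.2 then st.2.modify kv.2 0 (· + 1) else st.2.insert kv.2 1)
        else st)
      (PySem.Dict.empty, PySem.Dict.empty)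
    = (um.foldl (fun (d : PySem.Dict String Int) kv =>
          if 3 ≤ kv.2 ∧ 0 ≤ PySem.Str.find kv.1 " " then d.insert kv.1 kv.2 else d)
        PySem.Dict.empty,
       PySem.Dict.counter ((um.filter pvSel).map (·.2))) := by
  have hfun : (fun (st : PySem.Dict String Int × PySem.Dict Int Int) (kv : String × Int) =>
        if 3 ≤ kv.2 ∧ 0 ≤ PySem.Str.find kv.1 " " then
          (st.1.insert kv.1 kv.2,
           if st.2.contains kv.2 then st.2.modify kv.2 0 (· + 1) else st.2.insert kv.2 1)
        else st)
      = (fun st kv =>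
        (if 3 ≤ kv.2 ∧ 0 ≤ PySem.Str.find kv.1 " " then st.1.insert kv.1 kv.2 else st.1,
         if 3 ≤ kv.2 ∧ 0 ≤ PySem.Str.find kv.1 " " then st.2.insert kv.2 (st.2.getD kv.2 0 + 1) else st.2)) := by
    funext st kv
    by_cases h : 3 ≤ kv.2 ∧ 0 ≤ PySem.Str.find kv.1 " "
    · simp only [if_pos h, pv_cnt_step]
    · simp only [if_neg h]
  rw [hfun, PySem.List.foldl_prod_mk
    (f := fun (d : PySem.Dict String Int) (kv : String × Int) =>
      if 3 ≤ kv.2 ∧ 0 ≤ PySem.Str.find kv.1 " " then d.insert kv.1 kv.2 else d)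
    (g := fun (c : PySem.Dict Int Int) (kv : String × Int) =>
      if 3 ≤ kv.2 ∧ 0 ≤ PySem.Str.find kv.1 " " then c.insert kv.2 (c.getD kv.2 0 + 1) else c)]
  refine congrArg _ ?_
  have hbool : (fun (c : PySem.Dict Int Int) (kv : String × Int) =>
        if 3 ≤ kv.2 ∧ 0 ≤ PySem.Str.find kv.1 " " then c.insert kv.2 (c.getD kv.2 0 + 1) else c)
      = (fun (c : PySem.Dict Int Int) (kv : String × Int) =>
        if pvSel kv = true then c.insert kv.2 (c.getD kv.2 0 + 1) else c) := by
    funext c kv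
    by_cases h : 3 ≤ kv.2 ∧ 0 ≤ PySem.Str.find kv.1 " " <;> simp [pvSel, h]
  rw [hbool, ← List.foldl_filter (p := pvSel),
    ← List.foldl_map (f := fun kv : String × Int => kv.2)
      (g := fun (c : PySem.Dict Int Int) x => c.insert x (c.getD x 0 + 1)),
    PySem.Dict.foldl_insert_getD_add_one_eq_counter]

-- the per-item walk of B's Python, used only as a proof-side bridge between A's group walk
-- and B's closed-form index
def pvGoB (L : Int) : Int → List Int → Int
  | _, [] => 3
  | pp, u :: rest => if 5 * (pp + 1) > L then u else pvGoB L (pp + 1) rest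

-- the per-item walk with threshold len/5 lands exactly at index len // 5
theorem pv_goB_getD (n : Nat) (vs : List Int) (pp : Nat) (h : 5 * pp ≤ n) :
    pvGoB (n : Int) (pp : Int) vs = vs.getD (n / 5 - pp) 3 := by
  induction vs generalizing pp with
  | nil => simp [pvGoB]
  | cons u rest ih =>
    simp only [pvGoB]
    split_ifs with h1
    · have : n / 5 - pp = 0 := by omega
      simp [this]
    · have h5 : 5 * (pp + 1) ≤ n := by push_cast at h1; omega
      have hE : (pp : Int) + 1 = ((pp + 1 : Nat) : Int) := by push_cast; ring
      rw [hE, ih (pp + 1) h5]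
      have hidx : n / 5 - pp = (n / 5 - (pp + 1)) + 1 := by omega
      simp [hidx]

-- pvGoB over a block of m equal values crosses iff the whole block crosses
theorem pv_goB_replicate (L u : Int) (m : Nat) (hm : 1 ≤ m) (rest : List Int) (pp : Int) :
    pvGoB L pp (List.replicate m u ++ rest)
      = if 5 * (pp + m) > L then u else pvGoB L (pp + m) rest := by
  induction m generalizing pp with
  | zero => omega
  | succ k ih =>
    rcases Nat.eq_zero_or_pos k with hk | hk
    · subst hk; simp [pvGoB]
    · have hstep := ih hk (pp := pp + 1)
      simp only [List.replicate_succ, List.cons_append, pvGoB, hstep]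
      have hE : pp + 1 + (k : Int) = pp + ((k : Nat) + 1 : Nat) := by push_cast; ring
      rw [hE]
      split_ifs with h1 h2 <;> push_cast at * <;> first | rfl | omega

-- A's group-wise walk equals the item-wise walk over the flattened groups
theorem pv_goA_eq_goB (L : Int) (vs : List Int) (us : List Int) (pp : Int)
    (h : ∀ u ∈ us, u ∈ vs) :
    pvGoA L (PySem.Dict.counter vs) pp us
      = pvGoB L pp (us.flatMap (fun u => List.replicate (vs.count u) u)) := by
  induction us generalizing pp with
  | nil => simp [pvGoA, pvGoB]
  | cons u rest ih =>
    have hu : u ∈ vs := h u List.mem_cons_self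
    have hc : 1 ≤ vs.count u := List.count_pos_iff.mpr hu
    simp only [List.flatMap_cons, pvGoA, PySem.Dict.getD_counter]
    rw [pv_goB_replicate L u (vs.count u) hc _ pp]
    split_ifs with h1
    · rfl
    · exact ih _ (fun x hx => h x (List.mem_cons_of_mem _ hx))

-- count of any value in the flattened groups over the distinct values
theorem pv_count_flatMap (vs : List Int) (v : Int) (ds : List Int) (hnd : ds.Nodup) :
    (ds.flatMap (fun u => List.replicate (vs.count u) u)).count v
      = if v ∈ ds then vs.count v else 0 := by
  induction ds with
  | nil => simp
  | cons u rest ih =>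
    simp only [List.flatMap_cons, List.count_append, List.nodup_cons] at *
    rw [ih hnd.2]
    by_cases hv : v = u
    · subst hv
      simp [hnd.1]
    · simp [List.count_replicate, hv, Ne.symm hv]

-- the flattened groups over a strictly descending list are descending
theorem pv_pairwise_flatMap (vs : List Int) (ds : List Int)
    (h : ds.Pairwise (fun a b => b < a)) :
    (ds.flatMap (fun u => List.replicate (vs.count u) u)).Pairwise (fun a b => b ≤ a) := by
  induction ds with
  | nil => simp
  | cons u rest ih =>
    simp only [List.flatMap_cons, List.pairwise_cons] at *
    rw [List.pairwise_append]
    refine ⟨List.pairwise_replicate.mpr (Or.inr le_rfl), ih h.2, ?_⟩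
    intro x hx y hy
    obtain ⟨u', hu', hy'⟩ := List.mem_flatMap.mp hy
    have := List.eq_of_mem_replicate hx
    have := List.eq_of_mem_replicate hy'
    subst_vars
    exact le_of_lt (h.1 u' hu')

-- the descending-sorted multiset is the flattening of count-sized groups over
-- the descending-sorted distinct values
theorem pv_sorted_flatMap (vs : List Int) :
    PySem.List.sorted vs (fun u => u) true
      = (PySem.List.sorted (PySem.Set.ofList vs : List Int) (fun u => u) true).flatMap
          (fun u => List.replicate (vs.count u) u) := by
  have hperm : (PySem.List.sorted (PySem.Set.ofList vs : List Int) (fun u => u) true).Perm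
      (PySem.Set.ofList vs) := PySem.List.sorted_perm _ _ _
  have hnd : (PySem.List.sorted (PySem.Set.ofList vs : List Int) (fun u => u) true).Nodup :=
    hperm.nodup_iff.mpr (PySem.Set.nodup_ofList vs)
  have hge := PySem.List.sorted_pairwise_rev (PySem.Set.ofList vs : List Int) (fun u => u)
  have hgt : (PySem.List.sorted (PySem.Set.ofList vs : List Int) (fun u => u) true).Pairwise
      (fun a b => b < a) :=
    (hge.and hnd).imp (fun h => lt_of_le_of_ne h.1 (fun e => h.2 e.symm))
  refine List.Perm.eq_of_pairwise (fun a b _ _ h1 h2 => by omega)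
      (PySem.List.sorted_pairwise_rev vs (fun u => u)) (pv_pairwise_flatMap vs _ hgt) ?_
  · refine (PySem.List.sorted_perm vs (fun u => u) true).trans (List.perm_iff_count.mpr ?_)
    intro v
    rw [pv_count_flatMap vs v _ hnd]
    by_cases hv : v ∈ vs
    · rw [if_pos (by rw [PySem.List.mem_sorted]; exact (PySem.Set.mem_ofList vs v).mpr hv)]
    · rw [if_neg (by rw [PySem.List.mem_sorted]; exact fun hmem => hv ((PySem.Set.mem_ofList vs v).mp hmem)),
        List.count_eq_zero.mpr hv]

-- ===== VERDICT (by name: the statement is the Claim_ definition above) =====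
theorem getMostUsedMultipartList_spec : Claim_equal_getMostUsedMultipartList := by
  intro um _ hPre
  unfold Spec_getMostUsedMultipartList
  unfold Pre_getMostUsedMultipartList at hPre
  simp only [getMostUsedMultipartList, getMostUsedMultipartList_alt]
  rw [pv_pair_fold, pv_sel_eq]
  simp only
  have hselb : (fun (d : PySem.Dict String Int) (kv : String × Int) =>
      if 3 ≤ kv.2 ∧ 0 ≤ PySem.Str.find kv.1 " " then d.insert kv.1 kv.2 else d)
    = (fun d kv => if pvSel kv = true then d.insert kv.1 kv.2 else d) := by
    funext d kv
    by_cases h : 3 ≤ kv.2 ∧ 0 ≤ PySem.Str.find kv.1 " " <;> simp [pvSel, h]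
  have hsel : (um.foldl (fun (d : PySem.Dict String Int) kv =>
      if 3 ≤ kv.2 ∧ 0 ≤ PySem.Str.find kv.1 " " then d.insert kv.1 kv.2 else d)
      PySem.Dict.empty).items = um.filter pvSel := by
    rw [hselb]; exact pv_insert_fold_items um pvSel hPre
  have hmin : pvGoA (um.length : Int) (PySem.Dict.counter ((um.filter pvSel).map (·.2))) 0
      (PySem.List.sorted (PySem.Dict.counter ((um.filter pvSel).map (·.2))).keys (fun u => u) true)
    = (PySem.List.sorted ((um.filter pvSel).map (·.2)) (fun u => u) true).getD (um.length / 5) 3 := by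
    rw [PySem.Dict.keys_counter,
      pv_goA_eq_goB (um.length : Int) ((um.filter pvSel).map (·.2)) _ 0
        (fun u hu => (PySem.Set.mem_ofList _ u).mp ((PySem.List.mem_sorted _ _ _ u).mp hu)),
      ← pv_sorted_flatMap]
    have := pv_goB_getD um.length (PySem.List.sorted ((um.filter pvSel).map (·.2)) (fun u => u) true) 0
      (by omega)
    simpa using this
  rw [hmin]
  set M := (PySem.List.sorted ((um.filter pvSel).map (·.2)) (fun u => u) true).getD (um.length / 5) 3
    with hM
  by_cases h3 : 3 < M
  · simp only [if_pos h3]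
    have hndS : ((um.filter pvSel).map (·.1)).Nodup :=
      ((List.filter_sublist (l := um) (p := pvSel)).map (·.1)).nodup hPre
    have hredb : (fun (d : PySem.Dict String Int) (kv : String × Int) =>
        if M ≤ kv.2 then d.insert kv.1 kv.2 else d)
      = (fun d kv => if (fun kv : String × Int => decide (M ≤ kv.2)) kv = true
          then d.insert kv.1 kv.2 else d) := by
      funext d kv
      by_cases h : M ≤ kv.2 <;> simp [h]
    have hredu : (((um.filter pvSel).foldl (fun (d : PySem.Dict String Int) kv =>
        if M ≤ kv.2 then d.insert kv.1 kv.2 else d) PySem.Dict.empty)).items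
        = (um.filter pvSel).filter (fun kv => decide (M ≤ kv.2)) := by
      rw [hredb]
      exact pv_insert_fold_items (um.filter pvSel) (fun kv => decide (M ≤ kv.2)) hndS
    rw [hsel]
    simp only [PySem.Dict.keys, hredu, List.map_map]
    rfl
  · simp only [if_neg h3]
    simp only [PySem.Dict.keys, hsel, List.map_map]
    rfl
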